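-- pv_equiv track=rewrite | github.com/waynecheng92/ropasci360_agent | util.py | two_hexes_away
-- ===== SOURCE A (Python) =====
-- def two_hexes_away(r,q):
--     upper_bound = 4
--     lower_bound = -4
--     hexes = [(r + 2, q-2), (r +2 , q-1), (r+2, q ), (r + 1, q + 1), (r , q +2 ), (r - 1, q + 2),
--                 (r - 2, q + 2), (r - 2, q + 1), (r - 2, q), (r - 1, q - 1), (r , q - 2),(r + 1, q - 2)]
--     appli_hexes = []
--
--     for item in hexes:
--         if not (item[0] > upper_bound or item[0] < lower_bound or item[1] > upper_bound or item[1] < lower_bound or item[0] + item[1] > upper_bound or item[0] + item[1] < lower_bound):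
--             appli_hexes.append(item)
--     return appli_hexes
-- ===== SOURCE B (Python) =====
-- def two_hexes_away(r, q):
--     # radius-2 ring walk: start at center offset (+2,-2), apply each of the
--     # six axial directions exactly twice, then keep the on-board hexes
--     dirs = [(0, 1), (-1, 1), (-1, 0), (0, -1), (1, -1), (1, 0)]
--     x, y = r + 2, q - 2
--     ring = []
--     for dx, dy in dirs:
--         for _ in range(2):
--             ring.append((x, y))
--             x, y = x + dx, y + dy
--     return [h for h in ring if max(abs(h[0]), abs(h[1]), abs(h[0] + h[1])) <= 4]
-- ===== Notes on version B (the rewrite author's own statement) =====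
-- stated objective: alternative
-- what changed: Replaces the hardcoded 12-coordinate table with a ring walk generating the radius-2 hex ring from the six axial directions, and the six-way bound disjunction with a max-of-absolute-values filter.
import Mathlib
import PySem

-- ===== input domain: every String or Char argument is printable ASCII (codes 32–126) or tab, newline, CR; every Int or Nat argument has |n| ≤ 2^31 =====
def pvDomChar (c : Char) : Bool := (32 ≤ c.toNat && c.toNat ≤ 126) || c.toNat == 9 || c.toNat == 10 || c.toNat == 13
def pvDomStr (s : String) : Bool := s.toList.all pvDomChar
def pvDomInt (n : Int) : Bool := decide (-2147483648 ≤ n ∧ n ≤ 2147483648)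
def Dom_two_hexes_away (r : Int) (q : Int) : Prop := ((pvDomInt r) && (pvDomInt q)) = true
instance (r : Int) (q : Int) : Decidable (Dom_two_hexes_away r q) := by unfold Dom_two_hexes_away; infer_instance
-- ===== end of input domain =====

-- B generates the radius-2 ring by a direction walk instead of a literal table; objective: alternative decomposition, same cost.
-- ===== PORT A =====
def two_hexes_away (r : Int) (q : Int) : List (Int × Int) :=
  let upper_bound : Int := 4
  let lower_bound : Int := -4
  let hexes : List (Int × Int) :=
    [(r + 2, q - 2), (r + 2, q - 1), (r + 2, q), (r + 1, q + 1), (r, q + 2), (r - 1, q + 2),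
     (r - 2, q + 2), (r - 2, q + 1), (r - 2, q), (r - 1, q - 1), (r, q - 2), (r + 1, q - 2)]
  hexes.foldl (fun appli_hexes item =>
    if ¬(item.1 > upper_bound ∨ item.1 < lower_bound ∨ item.2 > upper_bound ∨
          item.2 < lower_bound ∨ item.1 + item.2 > upper_bound ∨ item.1 + item.2 < lower_bound)
    then appli_hexes ++ [item] else appli_hexes) []

-- ===== PORT B =====
def two_hexes_away_alt (r : Int) (q : Int) : List (Int × Int) :=
  let dirs : List (Int × Int) := [(0, 1), (-1, 1), (-1, 0), (0, -1), (1, -1), (1, 0)]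
  let walk := dirs.foldl (fun st d =>
      (List.range 2).foldl (fun st _ => ((st.1.1 + d.1, st.1.2 + d.2), st.2 ++ [st.1])) st)
    ((r + 2, q - 2), ([] : List (Int × Int)))
  walk.2.filter (fun h => decide (max (max |h.1| |h.2|) |h.1 + h.2| ≤ 4))

-- ===== PRECONDITION & SPEC =====
def Spec_two_hexes_away (r : Int) (q : Int) (out : List (Int × Int)) : Prop := out = two_hexes_away_alt r q
instance (r : Int) (q : Int) (out : List (Int × Int)) : Decidable (Spec_two_hexes_away r q out) := by unfold Spec_two_hexes_away; infer_instance

-- ===== CLAIM (what is proved, stated in full; the proofs are below) =====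
def Claim_equal_two_hexes_away : Prop := ∀ (r : Int) (q : Int), Dom_two_hexes_away r q → Spec_two_hexes_away r q (two_hexes_away r q)

-- ===== LEMMAS AND PROOFS =====

lemma bound_cond_eq (x y : Int) :
    (decide (max (max |x| |y|) |x + y| ≤ 4)) =
      decide (¬(x > (4:Int) ∨ x < -4 ∨ y > 4 ∨ y < -4 ∨ x + y > 4 ∨ x + y < -4)) := by
  rw [decide_eq_decide, max_le_iff, max_le_iff, abs_le, abs_le, abs_le]
  omega

-- ===== VERDICT (by name: the statement is the Claim_ definition above) =====
theorem two_hexes_away_spec : Claim_equal_two_hexes_away := by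
  intro r q _
  unfold Spec_two_hexes_away two_hexes_away two_hexes_away_alt
  rw [PySem.List.foldl_append_ite_eq_filter, List.nil_append]
  simp only [List.range, List.range.loop, List.foldl]
  simp only [bound_cond_eq]
  congr 1
  simp only [List.nil_append, List.cons_append,
    List.cons.injEq, Prod.mk.injEq, and_true, true_and]
  omega
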